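-- pv_equiv track=rewrite | github.com/s18692001/cemba_data | cemba_data/tools/methylpy_utilities.py | expand_nucleotide_code
-- ===== SOURCE A (Python) =====
-- import itertools
--
-- def expand_nucleotide_code(mc_type):
--     iub_dict = {"N": ["A", "C", "G", "T", "N"],
--                 "H": ["A", "C", "T", "H"],
--                 "D": ["A", "G", "T", "D"],
--                 "B": ["C", "G", "T", "B"],
--                 "A": ["A", "C", "G", "A"],
--                 "R": ["A", "G", "R"],
--                 "Y": ["C", "T", "Y"],
--                 "K": ["G", "T", "K"],
--                 "M": ["A", "C", "M"],
--                 "S": ["G", "C", "S"],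
--                 "W": ["A", "T", "W"],
--                 "C": ["C"],
--                 "G": ["G"],
--                 "T": ["T"],
--                 "A": ["A"]}
--
--     mc_class = list(mc_type)  # copy
--     if "C" in mc_type:
--         mc_class.extend(["CGN", "CHG", "CHH", "CNN"])
--     elif "CG" in mc_type:
--         mc_class.extend(["CGN"])
--
--     mc_class_final = []
--     for motif in mc_class:
--         mc_class_final.extend(["".join(i) for i in
--                                itertools.product(*[iub_dict[nuc] for nuc in motif])])
--     return (set(mc_class_final))
-- ===== SOURCE B (Python) =====
-- # B: no cartesian product at runtime. Each motif in mc_class is a single nucleotide,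
-- # whose expansion is just its IUB table entry; the only multi-character motifs A ever
-- # expands are the four fixed contexts appended when "C" occurs, whose combined
-- # expansion is a constant, precomputed below.
-- _IUB = {"N": ["A", "C", "G", "T", "N"],
--         "H": ["A", "C", "T", "H"],
--         "D": ["A", "G", "T", "D"],
--         "B": ["C", "G", "T", "B"],
--         "A": ["A"],
--         "R": ["A", "G", "R"],
--         "Y": ["C", "T", "Y"],
--         "K": ["G", "T", "K"],
--         "M": ["A", "C", "M"],
--         "S": ["G", "C", "S"],
--         "W": ["A", "T", "W"],
--         "C": ["C"],
--         "G": ["G"],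
--         "T": ["T"]}
--
-- # Expansions of "CGN", "CHG", "CHH", "CNN" (constant, precomputed once).
-- _C_CONTEXTS = ["CGA", "CGC", "CGG", "CGT", "CGN", "CAG", "CCG", "CTG", "CHG",
--                "CAA", "CAC", "CAT", "CAH", "CCA", "CCC", "CCT", "CCH", "CTA",
--                "CTC", "CTT", "CTH", "CHA", "CHC", "CHT", "CHH", "CAN", "CCN",
--                "CTN", "CNA", "CNC", "CNG", "CNT", "CNN"]
--
--
-- def expand_nucleotide_code(mc_type):
--     result = set()
--     for nuc in mc_type:
--         result.update(_IUB[nuc])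
--     if "C" in mc_type:
--         result.update(_C_CONTEXTS)
--     return result
-- ===== Notes on version B (the rewrite author's own statement) =====
-- stated objective: alternative
-- what changed: B does no cartesian-product expansion at runtime: every motif from list(mc_type) is a single nucleotide whose expansion is its IUB table entry, and the four context motifs appended when the input contains a cytosine code have a constant combined expansion, so B unions per-character table entries and one precomputed constant list; A's unreachable second branch and shadowed duplicate dict entry are dropped.
import Mathlib
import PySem

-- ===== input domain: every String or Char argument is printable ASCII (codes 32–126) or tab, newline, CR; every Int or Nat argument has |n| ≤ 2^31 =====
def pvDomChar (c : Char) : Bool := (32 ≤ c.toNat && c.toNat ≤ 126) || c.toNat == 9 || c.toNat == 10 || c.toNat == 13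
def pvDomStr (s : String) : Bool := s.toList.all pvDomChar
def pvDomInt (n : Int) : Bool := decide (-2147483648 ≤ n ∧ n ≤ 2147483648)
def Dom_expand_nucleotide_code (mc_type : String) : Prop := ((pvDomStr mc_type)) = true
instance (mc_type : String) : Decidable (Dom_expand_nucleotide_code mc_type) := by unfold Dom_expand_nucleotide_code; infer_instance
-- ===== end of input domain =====

-- B replaces A's runtime itertools.product expansion by per-character table lookups plus ONE
-- precomputed constant list (the combined expansion of the four fixed 'C' context motifs)
-- (objective: alternative algorithm). The equivalence is about the RETURN value.

-- ===== PORT A =====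
-- A's dict literal, duplicate "A" key included (later value overwrites in place, as in Python)
def pvIubA : PySem.Dict String (List String) :=
  PySem.Dict.ofList
    [("N", ["A", "C", "G", "T", "N"]),
     ("H", ["A", "C", "T", "H"]),
     ("D", ["A", "G", "T", "D"]),
     ("B", ["C", "G", "T", "B"]),
     ("A", ["A", "C", "G", "A"]),
     ("R", ["A", "G", "R"]),
     ("Y", ["C", "T", "Y"]),
     ("K", ["G", "T", "K"]),
     ("M", ["A", "C", "M"]),
     ("S", ["G", "C", "S"]),
     ("W", ["A", "T", "W"]),
     ("C", ["C"]),
     ("G", ["G"]),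
     ("T", ["T"]),
     ("A", ["A"])]

-- itertools.product(*lists) as lists (first factor varies slowest, CPython's order)
def pvProduct : List (List String) → List (List String)
  | [] => [[]]
  | l :: ls => l.flatMap (fun x => (pvProduct ls).map (fun rest => x :: rest))

-- dict lookup iub_dict[nuc]; KeyError (= get? none) is excluded by Pre_ below
def pvLookupA (nuc : Char) : List String := (pvIubA.get? (String.ofList [nuc])).getD []

def expand_nucleotide_code (mc_type : String) : List String :=
  let mc_class := mc_type.toList.map (fun c => String.ofList [c])   -- list(mc_type)
  let mc_class :=
    if PySem.Str.isIn "C" mc_type then mc_class ++ ["CGN", "CHG", "CHH", "CNN"]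
    else if PySem.Str.isIn "CG" mc_type then mc_class ++ ["CGN"]
    else mc_class
  let mc_class_final := mc_class.foldl (fun acc motif =>
    acc ++ (pvProduct (motif.toList.map pvLookupA)).map (PySem.Str.join "")) []
  PySem.Set.ofList mc_class_final

-- ===== PORT B =====
-- B's dict literal (single-nucleotide expansions only; no duplicate key)
def pvIubB : PySem.Dict String (List String) :=
  PySem.Dict.ofList
    [("N", ["A", "C", "G", "T", "N"]),
     ("H", ["A", "C", "T", "H"]),
     ("D", ["A", "G", "T", "D"]),
     ("B", ["C", "G", "T", "B"]),
     ("A", ["A"]),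
     ("R", ["A", "G", "R"]),
     ("Y", ["C", "T", "Y"]),
     ("K", ["G", "T", "K"]),
     ("M", ["A", "C", "M"]),
     ("S", ["G", "C", "S"]),
     ("W", ["A", "T", "W"]),
     ("C", ["C"]),
     ("G", ["G"]),
     ("T", ["T"])]

def pvLookupB (nuc : Char) : List String := (pvIubB.get? (String.ofList [nuc])).getD []

-- B's precomputed constant: the combined expansion of "CGN", "CHG", "CHH", "CNN"
def pvCContexts : List String :=
  ["CGA", "CGC", "CGG", "CGT", "CGN", "CAG", "CCG", "CTG", "CHG",
   "CAA", "CAC", "CAT", "CAH", "CCA", "CCC", "CCT", "CCH", "CTA",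
   "CTC", "CTT", "CTH", "CHA", "CHC", "CHT", "CHH", "CAN", "CCN",
   "CTN", "CNA", "CNC", "CNG", "CNT", "CNN"]

def expand_nucleotide_code_alt (mc_type : String) : List String :=
  let result := mc_type.toList.foldl
    (fun result nuc => PySem.Set.update result (pvLookupB nuc)) PySem.Set.empty
  if PySem.Str.isIn "C" mc_type then PySem.Set.update result pvCContexts else result

-- ===== PRECONDITION & SPEC =====
-- Pre_ excludes exactly the inputs containing a character that is not an IUB-dict key:
-- there Python A raises KeyError (and Python B does too).
def Pre_expand_nucleotide_code (mc_type : String) : Prop :=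
  mc_type.toList.all
    (fun c => ['N', 'H', 'D', 'B', 'A', 'R', 'Y', 'K', 'M', 'S', 'W', 'C', 'G', 'T'].contains c) = true
instance (mc_type : String) : Decidable (Pre_expand_nucleotide_code mc_type) := by
  unfold Pre_expand_nucleotide_code; infer_instance
def pvWitness_expand_nucleotide_code : String := "CGW"

def Spec_expand_nucleotide_code (mc_type : String) (out : List String) : Prop :=
  out = expand_nucleotide_code_alt mc_type
instance (mc_type : String) (out : List String) : Decidable (Spec_expand_nucleotide_code mc_type out) := by
  unfold Spec_expand_nucleotide_code; infer_instance

-- ===== CLAIM (what is proved, stated in full; the proofs are below) =====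
def Claim_equal_expand_nucleotide_code : Prop :=
  ∀ (mc_type : String), Dom_expand_nucleotide_code mc_type →
    Pre_expand_nucleotide_code mc_type →
    Spec_expand_nucleotide_code mc_type (expand_nucleotide_code mc_type)

-- ===== LEMMAS AND PROOFS =====

theorem pvLookup_eq : pvLookupA = pvLookupB := by
  funext c
  simp only [pvLookupA, pvLookupB]
  have : pvIubA = pvIubB := by decide
  rw [this]

theorem pvJoin_nil : PySem.Str.join "" [] = "" := by decide

theorem pvJoin_cons (x : String) (xs : List String) :
    PySem.Str.join "" (x :: xs) = x ++ PySem.Str.join "" xs := by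
  apply String.toList_inj.mp
  cases xs <;> simp [PySem.Str.join, PySem.Chars.join, List.intercalate]

-- A's expansion of a SINGLE-nucleotide motif is just the table entry
theorem pvSingle (l : List String) :
    (pvProduct [l]).map (PySem.Str.join "") = l := by
  induction l with
  | nil => rfl
  | cons x xs ih =>
      simp only [pvProduct, List.flatMap_cons, List.map_append, List.map_cons, List.map_nil] at ih ⊢
      rw [ih, pvJoin_cons, pvJoin_nil]
      simp

-- accumulating "append then dedup once" equals "union item by item"
theorem pvSet_fold (F : String → List String) (ms : List String) (l : List String) :
    PySem.Set.ofList (ms.foldl (fun acc m => acc ++ F m) l)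
      = ms.foldl (fun s m => PySem.Set.update s (F m)) (PySem.Set.ofList l) := by
  induction ms generalizing l with
  | nil => rfl
  | cons m ms ih => simp only [List.foldl_cons]; rw [ih, PySem.Set.ofList_append]

-- updating with a list only depends on its first-occurrence dedup
theorem pvUpdate_congr (s : PySem.Set String) (l l' : List String)
    (h : PySem.Set.ofList l = PySem.Set.ofList l') :
    PySem.Set.update s l = PySem.Set.update s l' := by
  rw [PySem.Set.update_eq_append_filter, PySem.Set.update_eq_append_filter, h]

-- "C" not in s → "CG" not in s (so A's elif branch never fires when the if does not)
theorem pvCG_of_C (s : String) (h : PySem.Str.isIn "C" s = false) :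
    PySem.Str.isIn "CG" s = false := by
  rw [Bool.eq_false_iff] at h ⊢
  intro hcg
  exact h ((PySem.Str.isIn_iff_infix _ _).mpr
    (((show ['C'] <+: ['C', 'G'] from ⟨['G'], rfl⟩).isInfix).trans
      ((PySem.Str.isIn_iff_infix _ _).mp hcg)))

-- the per-character part of A coincides with B's per-character fold
theorem pvChars (cs : List Char) (s0 : PySem.Set String) :
    ((cs.map (fun c => String.ofList [c])).foldl
        (fun s m => PySem.Set.update s
          ((pvProduct (m.toList.map pvLookupA)).map (PySem.Str.join ""))) s0)
      = cs.foldl (fun s nuc => PySem.Set.update s (pvLookupB nuc)) s0 := by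
  rw [List.foldl_map]
  apply List.foldl_ext
  intro s c _
  simp [String.toList_ofList, pvSingle, pvLookup_eq]

-- ===== VERDICT (by name: the statement is the Claim_ definition above) =====
set_option maxRecDepth 8192 in
theorem expand_nucleotide_code_spec : Claim_equal_expand_nucleotide_code := by
  intro mc_type _ _
  unfold Spec_expand_nucleotide_code expand_nucleotide_code expand_nucleotide_code_alt
  by_cases hC : PySem.Str.isIn "C" mc_type = true
  · simp only [hC, if_true]
    rw [pvSet_fold, List.foldl_append, pvChars]
    simp only [List.foldl_cons, List.foldl_nil]
    rw [show ∀ s e1 e2 e3 e4,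
        PySem.Set.update (PySem.Set.update (PySem.Set.update (PySem.Set.update s e1) e2) e3) e4
          = PySem.Set.update s (e1 ++ e2 ++ e3 ++ e4) by
      intro s e1 e2 e3 e4
      simp [PySem.Set.update_append]]
    exact pvUpdate_congr _ _ _ (by decide)
  · rw [Bool.not_eq_true] at hC
    simp only [hC, pvCG_of_C mc_type hC, Bool.false_eq_true, if_false]
    rw [pvSet_fold]
    exact pvChars mc_type.toList _
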